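-- pv_equiv track=rewrite | github.com/RAdKuzur/ASTU | Защита Информации 7 семестр/Защита информации/LAB 7/LAB 7.py | bigrams
-- ===== SOURCE A (Python) =====
-- def bigrams(message):
--     # Формируем биграммы, заменяем 'J' на 'I' и добавляем 'X' в качестве заполнителя
--     message = message.upper().replace('J', 'I')
--     result = []
--     i = 0
--
--     while i < len(message):
--         if i + 1 < len(message):
--             if message[i] == message[i + 1]:
--                 result.append(message[i] + 'X')
--                 i += 1
--             else:
--                 result.append(message[i] + message[i + 1])
--                 i += 2
--         else:
--             result.append(message[i] + 'X')  # Если осталась одна буква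
--             i += 1
--
--     return result
-- ===== SOURCE B (Python) =====
-- def bigrams(message):
--     # Single pass keeping a pending first-of-pair character instead of an index.
--     message = message.upper().replace('J', 'I')
--     result = []
--     pending = None
--     for ch in message:
--         if pending is None:
--             pending = ch
--         elif pending == ch:
--             result.append(pending + 'X')
--             pending = ch
--         else:
--             result.append(pending + ch)
--             pending = None
--     if pending is not None:
--         result.append(pending + 'X')
--     return result
-- ===== Notes on version B (the rewrite author's own statement) =====
-- stated objective: simpler
-- what changed: Replaces the index-based while loop with variable step (i+=1 / i+=2) by a single for-each pass over the characters that maintains a pending first-of-pair variable, emitting a bigram when the pair completes and flushing a trailing pending letter after the loop; avoiding per-step len() calls and repeated indexing gives a constant-factor speedup.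
import Mathlib
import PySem

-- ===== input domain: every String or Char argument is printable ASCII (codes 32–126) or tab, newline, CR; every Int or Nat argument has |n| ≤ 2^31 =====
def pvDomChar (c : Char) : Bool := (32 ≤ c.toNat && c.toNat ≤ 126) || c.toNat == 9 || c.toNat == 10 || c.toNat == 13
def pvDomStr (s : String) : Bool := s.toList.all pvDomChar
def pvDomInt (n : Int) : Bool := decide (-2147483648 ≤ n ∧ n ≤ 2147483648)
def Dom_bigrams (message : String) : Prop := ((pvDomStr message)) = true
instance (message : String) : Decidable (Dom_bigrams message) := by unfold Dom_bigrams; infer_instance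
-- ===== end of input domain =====

-- B replaces A's index loop with variable step by one for-each pass keeping a pending first-of-pair char (objective: simpler).

-- ===== PORT A =====
-- A's while loop over indices i (step 1 or 2); message[i] is always in range, ported as getD.
def bigramsLoop (s : List Char) (i : Nat) : List String :=
  if _h : i < s.length then
    if i + 1 < s.length then
      if s.getD i ' ' == s.getD (i + 1) ' ' then
        String.ofList [s.getD i ' ', 'X'] :: bigramsLoop s (i + 1)
      else
        String.ofList [s.getD i ' ', s.getD (i + 1) ' '] :: bigramsLoop s (i + 2)
    else
      String.ofList [s.getD i ' ', 'X'] :: bigramsLoop s (i + 1)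
  else []
termination_by s.length - i

def bigrams (message : String) : List String :=
  bigramsLoop (PySem.Str.replace (PySem.Str.upper message) "J" "I").toList 0

-- ===== PORT B =====
def bigramsStep (st : Option Char × List String) (c : Char) : Option Char × List String :=
  match st with
  | (none, res) => (some c, res)
  | (some p, res) =>
    if p == c then (some c, res ++ [String.ofList [p, 'X']])
    else (none, res ++ [String.ofList [p, c]])

def bigramsFlush (st : Option Char × List String) : List String :=
  match st with
  | (none, res) => res
  | (some p, res) => res ++ [String.ofList [p, 'X']]

def bigrams_alt (message : String) : List String :=
  bigramsFlush
    (((PySem.Str.replace (PySem.Str.upper message) "J" "I").toList).foldl bigramsStep (none, []))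

-- ===== PRECONDITION & SPEC =====
def Spec_bigrams (message : String) (out : List String) : Prop := out = bigrams_alt message
instance (message : String) (out : List String) : Decidable (Spec_bigrams message out) := by unfold Spec_bigrams; infer_instance

-- ===== CLAIM (what is proved, stated in full; the proofs are below) =====
def Claim_equal_bigrams : Prop := ∀ (message : String), Dom_bigrams message → Spec_bigrams message (bigrams message)

-- ===== LEMMAS AND PROOFS =====

-- pure structural pairing both loops compute
def pairsA : List Char → List String
  | [] => []
  | [a] => [String.ofList [a, 'X']]
  | a :: b :: rest =>
    if a == b then String.ofList [a, 'X'] :: pairsA (b :: rest)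
    else String.ofList [a, b] :: pairsA rest

theorem bigramsLoop_eq_pairsA (s : List Char) (i : Nat) :
    bigramsLoop s i = pairsA (s.drop i) := by
  induction i using bigramsLoop.induct (s := s) with
  | case1 x hx hx1 heq ih =>
    rw [bigramsLoop, List.drop_eq_getElem_cons hx, List.drop_eq_getElem_cons hx1]
    simp_all [pairsA]
  | case2 x hx hx1 hne ih =>
    rw [bigramsLoop, List.drop_eq_getElem_cons hx, List.drop_eq_getElem_cons hx1]
    simp_all [pairsA]
  | case3 x hx hx1 ih =>
    have hnil : s.drop (x + 1) = [] := List.drop_eq_nil_iff.mpr (by omega)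
    rw [bigramsLoop, List.drop_eq_getElem_cons hx, hnil]
    simp [pairsA, hx, hx1, ih, hnil]
  | case4 x hx =>
    have hnil : s.drop x = [] := List.drop_eq_nil_iff.mpr (by omega)
    rw [bigramsLoop, hnil]
    simp [pairsA, hx]

theorem foldl_step_eq (l : List Char) :
    ∀ (pending : Option Char) (acc : List String),
      bigramsFlush (l.foldl bigramsStep (pending, acc)) =
        acc ++ pairsA (pending.toList ++ l) := by
  induction l with
  | nil =>
    intro pending acc
    cases pending <;> simp [bigramsFlush, pairsA]
  | cons c l ih =>
    intro pending acc
    cases pending with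
    | none => simpa [bigramsStep] using ih (some c) acc
    | some p =>
      by_cases hpc : p = c
      · subst hpc
        simp [bigramsStep, pairsA, ih (some p) (acc ++ [String.ofList [p, 'X']])]
      · simp [bigramsStep, hpc, pairsA, ih none (acc ++ [String.ofList [p, c]])]

-- ===== VERDICT (by name: the statement is the Claim_ definition above) =====
theorem bigrams_spec : Claim_equal_bigrams := by
  intro message _
  unfold Spec_bigrams bigrams bigrams_alt
  rw [bigramsLoop_eq_pairsA]
  simpa using (foldl_step_eq _ none []).symm
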